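-- pv_equiv track=rewrite | github.com/TilenG2/Programiranje1 | Domace_Naloge/DN5_test.py | pretvori_vrstico
-- ===== SOURCE A (Python) =====
-- def pretvori_vrstico(vrstica):
--     x = 1
--     seznam = []
--     block = False
--     vrstica += '.'
--     for c in vrstica:
--         if c == '#' and not block:
--             x1 = x
--             block = True
--         if block and c == '.':
--             seznam.append((x1, x-1))
--             block = False
--         x += 1
--     return seznam
-- ===== SOURCE B (Python) =====
-- def pretvori_vrstico(vrstica):
--     # Idiomatic rewrite: jump from '#' to the next '.' with str.partition instead
--     # of a per-character block flag; recursion replaces the state machine.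
--     def go(s, pos):
--         pre, hash_sep, rest = s.partition('#')
--         if not hash_sep:
--             return []
--         start = pos + len(pre) + 1
--         blk, dot, tail = rest.partition('.')
--         if not dot:
--             return [(start, start + len(blk))]
--         return [(start, start + len(blk))] + go(tail, start + len(blk) + 1)
--     return go(vrstica, 0)
-- ===== Notes on version B (the rewrite author's own statement) =====
-- stated objective: idiomatic
-- what changed: Replaced the per-character state machine (block flag, running counter, appended sentinel '.') by a recursion that jumps from each '#' to the next '.' using str.partition and computes the interval from the piece lengths.
import Mathlib
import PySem

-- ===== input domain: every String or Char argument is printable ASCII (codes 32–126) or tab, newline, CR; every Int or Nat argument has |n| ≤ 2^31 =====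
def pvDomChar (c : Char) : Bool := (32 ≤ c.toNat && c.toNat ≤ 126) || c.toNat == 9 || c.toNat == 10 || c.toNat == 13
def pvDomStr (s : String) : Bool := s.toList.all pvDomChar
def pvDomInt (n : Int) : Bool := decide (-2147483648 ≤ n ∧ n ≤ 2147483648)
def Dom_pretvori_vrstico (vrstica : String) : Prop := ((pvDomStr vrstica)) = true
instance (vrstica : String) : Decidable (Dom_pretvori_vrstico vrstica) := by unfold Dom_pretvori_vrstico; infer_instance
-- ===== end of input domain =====

-- B replaces A's per-character block-flag state machine by an idiomatic recursion that
-- jumps from each '#' to the next '.' with str.partition (objective: idiomatic; no speed claim).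


-- ===== PORT A =====
-- A's for-loop as structural recursion over the characters, same state (x, block, x1, seznam);
-- Python's x1 is uninitialized before the first '#' and never read there — modelled by initial value 0
def pretvoriLoopA : List Char → Int → Bool → Int → List (Int × Int) → List (Int × Int)
  | [], _, _, _, seznam => seznam
  | c :: cs, x, block, x1, seznam =>
    let x1' := if c = '#' ∧ block = false then x else x1
    let block' := if c = '#' ∧ block = false then true else block
    let seznam' := if block' = true ∧ c = '.' then seznam ++ [(x1', x - 1)] else seznam
    let block'' := if block' = true ∧ c = '.' then false else block'
    pretvoriLoopA cs (x + 1) block'' x1' seznam'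

def pretvori_vrstico (vrstica : String) : List (Int × Int) :=
  pretvoriLoopA (vrstica ++ ".").toList 1 false 0 []

-- ===== PORT B =====
-- s.partition(sep) for a one-character sep, ported by hand (exact: Python splits at the first
-- occurrence of sep; the Bool component says whether sep was found, i.e. whether the middle
-- component of Python's triple is nonempty)
def pyPartition1 (s : List Char) (sep : Char) : List Char × Bool × List Char :=
  if (s.takeWhile (fun d => decide (d ≠ sep))).length = s.length then
    (s.takeWhile (fun d => decide (d ≠ sep)), false, [])
  else
    (s.takeWhile (fun d => decide (d ≠ sep)), true,
      s.drop ((s.takeWhile (fun d => decide (d ≠ sep))).length + 1))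

-- the two facts the recursion below needs for termination
theorem pyPartition1_tail_le (t : List Char) (c : Char) :
    (pyPartition1 t c).2.2.length ≤ t.length := by
  unfold pyPartition1
  split_ifs <;> simp

theorem pyPartition1_found_lt (t : List Char) (c : Char)
    (h : (pyPartition1 t c).2.1 = true) : (pyPartition1 t c).2.2.length < t.length := by
  have hle := (List.takeWhile_sublist (p := fun d => decide (d ≠ c)) (l := t)).length_le
  unfold pyPartition1 at h ⊢
  split_ifs at h ⊢ with h1
  simp
  omega

def pretvoriGoB (s : List Char) (pos : Int) : List (Int × Int) :=
  let p1 := pyPartition1 s '#'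
  if p1.2.1 = false then []
  else
    let start := pos + p1.1.length + 1
    let p2 := pyPartition1 p1.2.2 '.'
    if p2.2.1 = false then [(start, start + p2.1.length)]
    else (start, start + (p2.1.length : Int)) :: pretvoriGoB p2.2.2 (start + p2.1.length + 1)
termination_by s.length
decreasing_by
  rename_i h1 _
  have h1' : (pyPartition1 s '#').2.1 = true := by simpa using h1
  exact lt_of_le_of_lt (pyPartition1_tail_le _ _) (pyPartition1_found_lt _ _ h1')

def pretvori_vrstico_alt (vrstica : String) : List (Int × Int) :=
  pretvoriGoB vrstica.toList 0

-- ===== PRECONDITION & SPEC =====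
def Spec_pretvori_vrstico (vrstica : String) (out : List (Int × Int)) : Prop := out = pretvori_vrstico_alt vrstica
instance (vrstica : String) (out : List (Int × Int)) : Decidable (Spec_pretvori_vrstico vrstica out) := by unfold Spec_pretvori_vrstico; infer_instance

-- ===== CLAIM (what is proved, stated in full; the proofs are below) =====
def Claim_equal_pretvori_vrstico : Prop := ∀ (vrstica : String), Dom_pretvori_vrstico vrstica → Spec_pretvori_vrstico vrstica (pretvori_vrstico vrstica)

-- ===== LEMMAS AND PROOFS =====

theorem pyPartition1_nil (sep : Char) : pyPartition1 [] sep = ([], false, []) := by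
  simp [pyPartition1]

theorem pyPartition1_cons_eq (cs : List Char) (sep : Char) :
    pyPartition1 (sep :: cs) sep = ([], true, cs) := by
  simp [pyPartition1]

theorem pyPartition1_cons_ne (c : Char) (cs : List Char) (sep : Char) (h : c ≠ sep) :
    pyPartition1 (c :: cs) sep =
      (c :: (pyPartition1 cs sep).1, (pyPartition1 cs sep).2.1, (pyPartition1 cs sep).2.2) := by
  have htw : List.takeWhile (fun d => decide (d ≠ sep)) (c :: cs) =
      c :: List.takeWhile (fun d => decide (d ≠ sep)) cs := by
    rw [List.takeWhile_cons, if_pos (by simp [h])]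
  unfold pyPartition1
  rw [htw]
  simp only [List.length_cons, List.drop_succ_cons, Nat.add_right_cancel_iff]
  split_ifs <;> rfl

-- unfolding lemmas for B's recursion
theorem pretvoriGoB_nil (pos : Int) : pretvoriGoB [] pos = [] := by
  unfold pretvoriGoB
  rw [pyPartition1_nil]
  simp

theorem pretvoriGoB_cons_ne (c : Char) (cs : List Char) (pos : Int) (h : c ≠ '#') :
    pretvoriGoB (c :: cs) pos = pretvoriGoB cs (pos + 1) := by
  conv_lhs => unfold pretvoriGoB
  conv_rhs => unfold pretvoriGoB
  rw [pyPartition1_cons_ne c cs '#' h]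
  by_cases hf : (pyPartition1 cs '#').2.1 = false
  · simp [hf]
  · simp only [hf, List.length_cons, Nat.cast_add, Nat.cast_one]
    have harith : pos + ((pyPartition1 cs '#').1.length + 1 : Int) + 1 =
        pos + 1 + ((pyPartition1 cs '#').1.length : Int) + 1 := by ring
    rw [harith]

theorem pretvoriGoB_cons_hash (cs : List Char) (pos : Int) :
    pretvoriGoB ('#' :: cs) pos =
      (pos + 1, pos + 1 + ((pyPartition1 cs '.').1.length : Int)) ::
        (if (pyPartition1 cs '.').2.1 = false then []
         else pretvoriGoB (pyPartition1 cs '.').2.2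
                (pos + 1 + ((pyPartition1 cs '.').1.length : Int) + 1)) := by
  conv_lhs => unfold pretvoriGoB
  rw [pyPartition1_cons_eq]
  norm_num
  split_ifs <;> rfl

-- step lemmas for A's loop
theorem loopA_hash_false (cs : List Char) (x x1 : Int) (acc : List (Int × Int)) :
    pretvoriLoopA ('#' :: cs) x false x1 acc = pretvoriLoopA cs (x + 1) true x acc := by
  simp [pretvoriLoopA]

theorem loopA_other_false (c : Char) (cs : List Char) (x x1 : Int) (acc : List (Int × Int))
    (h : c ≠ '#') :
    pretvoriLoopA (c :: cs) x false x1 acc = pretvoriLoopA cs (x + 1) false x1 acc := by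
  simp [pretvoriLoopA, h]

theorem loopA_dot_true (cs : List Char) (x x1 : Int) (acc : List (Int × Int)) :
    pretvoriLoopA ('.' :: cs) x true x1 acc =
      pretvoriLoopA cs (x + 1) false x1 (acc ++ [(x1, x - 1)]) := by
  simp [pretvoriLoopA]

theorem loopA_other_true (c : Char) (cs : List Char) (x x1 : Int) (acc : List (Int × Int))
    (h : c ≠ '.') :
    pretvoriLoopA (c :: cs) x true x1 acc = pretvoriLoopA cs (x + 1) true x1 acc := by
  by_cases hh : c = '#' <;> simp [pretvoriLoopA, h, hh]

-- the loop invariant: A's scan of cs ++ ['.'] (outside / inside a block) equals B's jump recursion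
theorem loopA_eq_goB (cs : List Char) :
    (∀ (x x1 : Int) (acc : List (Int × Int)),
        pretvoriLoopA (cs ++ ['.']) x false x1 acc = acc ++ pretvoriGoB cs (x - 1)) ∧
    (∀ (x x1 : Int) (acc : List (Int × Int)),
        pretvoriLoopA (cs ++ ['.']) x true x1 acc =
          acc ++ (x1, x - 1 + ((pyPartition1 cs '.').1.length : Int)) ::
            (if (pyPartition1 cs '.').2.1 = false then []
             else pretvoriGoB (pyPartition1 cs '.').2.2
                    (x + ((pyPartition1 cs '.').1.length : Int)))) := by
  induction cs with
  | nil =>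
    constructor
    · intro x x1 acc
      simp [pretvoriLoopA, pretvoriGoB_nil]
    · intro x x1 acc
      simp [pretvoriLoopA, pyPartition1_nil]
  | cons c cs ih =>
    obtain ⟨ihF, ihT⟩ := ih
    constructor
    · intro x x1 acc
      by_cases hh : c = '#'
      · subst hh
        rw [List.cons_append, loopA_hash_false, ihT (x + 1) x acc, pretvoriGoB_cons_hash]
        have e0 : x - 1 + 1 = x := by ring
        have e1 : x + 1 - 1 = x := by ring
        have e2 : x + 1 + ((pyPartition1 cs '.').1.length : Int) =
            x + ((pyPartition1 cs '.').1.length : Int) + 1 := by ring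
        rw [e0, e1, e2]
      · rw [List.cons_append, loopA_other_false c _ _ _ _ hh, ihF (x + 1) x1 acc,
          pretvoriGoB_cons_ne c cs (x - 1) hh]
        have e1 : x + 1 - 1 = x - 1 + 1 := by ring
        rw [e1]
    · intro x x1 acc
      by_cases hd : c = '.'
      · subst hd
        rw [List.cons_append, loopA_dot_true, ihF (x + 1) x1 _, pyPartition1_cons_eq]
        have e1 : x + 1 - 1 = x := by ring
        rw [e1]
        simp
      · rw [List.cons_append, loopA_other_true c _ _ _ _ hd, ihT (x + 1) x1 acc,
          pyPartition1_cons_ne c cs '.' hd]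
        simp only [List.length_cons, Nat.cast_add, Nat.cast_one]
        have e1 : x + 1 - 1 + ((pyPartition1 cs '.').1.length : Int) =
            x - 1 + (((pyPartition1 cs '.').1.length : Int) + 1) := by ring
        have e2 : x + 1 + ((pyPartition1 cs '.').1.length : Int) =
            x + (((pyPartition1 cs '.').1.length : Int) + 1) := by ring
        rw [e1, e2]

-- ===== VERDICT (by name: the statement is the Claim_ definition above) =====
theorem pretvori_vrstico_spec : Claim_equal_pretvori_vrstico := by
  intro s _
  unfold Spec_pretvori_vrstico pretvori_vrstico pretvori_vrstico_alt
  have h : (s ++ ".").toList = s.toList ++ ['.'] := by simp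
  rw [h, (loopA_eq_goB s.toList).1 1 0 []]
  norm_num
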